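-- pv_equiv track=rewrite | github.com/carloosochoa/python | cOchoa_boletin7.py | cadena_alaquasera
-- ===== SOURCE A (Python) =====
-- def cadena_alaquasera(cadena):
--     pos = 0
--
--     for i in cadena:
--         pos += 1
--         if pos % 4 == 0:
--             if i not in ["A", "E", "I", "O", "U", "a", "e", "i", "o", "u"]:
--                 return False
--         elif pos % 4 == 1:
--             if i not in ["q", "w", "r", "t", "y", "p", "s", "d", "f", "g", "h", "j", "k", "l", "z", "x", "c", "v", "b",
--                          "n", "m"]:
--                 return False
--         elif pos % 4 == 2:
--             if i not in ["0", "1", "2", "3", "4", "5", "6", "7", "8", "9"]: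
--                 return False
--         elif pos % 4 == 3:
--             if i not in ["-"]:
--                 return False
--     return True
-- ===== SOURCE B (Python) =====
-- PATTERN = ("qwrtypsdfghjklzxcvbnm", "0123456789", "-", "AEIOUaeiou")
--
-- def cadena_alaquasera(cadena):
--     # process the string in 4-character blocks, each matched against the fixed pattern
--     for k in range(0, len(cadena), 4):
--         if not all(c in allowed for c, allowed in zip(cadena[k:k+4], PATTERN)):
--             return False
--     return True
-- ===== Notes on version B (the rewrite author's own statement) =====
-- stated objective: simpler
-- what changed: B drops the position counter and the four-way mod-4 if/elif dispatch: it cuts the string into 4-character blocks and zips each block against one fixed tuple of allowed-character strings, so every block is checked by a single uniform zip/all pass.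
import Mathlib
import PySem

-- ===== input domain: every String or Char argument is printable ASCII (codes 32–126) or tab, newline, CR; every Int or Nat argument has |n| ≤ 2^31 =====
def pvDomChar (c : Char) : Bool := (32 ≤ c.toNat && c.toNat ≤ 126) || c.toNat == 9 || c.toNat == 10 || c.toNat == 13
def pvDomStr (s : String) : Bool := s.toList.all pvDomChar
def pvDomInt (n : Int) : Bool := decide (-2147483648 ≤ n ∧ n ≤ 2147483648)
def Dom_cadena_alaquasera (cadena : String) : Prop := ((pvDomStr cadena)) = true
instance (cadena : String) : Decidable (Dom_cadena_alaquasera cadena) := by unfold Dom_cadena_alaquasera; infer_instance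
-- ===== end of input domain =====

-- B replaces A's position counter with mod-4 if/elif dispatch by cutting the string
-- into 4-character blocks, each zipped against one fixed tuple of allowed classes (simpler).


-- ===== PORT A =====
def pvVowels : List Char := ['A','E','I','O','U','a','e','i','o','u']
def pvConsonants : List Char :=
  ['q','w','r','t','y','p','s','d','f','g','h','j','k','l','z','x','c','v','b','n','m']
def pvDigits : List Char := ['0','1','2','3','4','5','6','7','8','9']

-- the for-loop of A: state is the running position counter `pos`
def pvLoopA : List Char → Int → Bool
  | [], _ => true
  | i :: rest, pos =>
    let pos := pos + 1
    if pos % 4 == 0 then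
      if !(pvVowels.contains i) then false else pvLoopA rest pos
    else if pos % 4 == 1 then
      if !(pvConsonants.contains i) then false else pvLoopA rest pos
    else if pos % 4 == 2 then
      if !(pvDigits.contains i) then false else pvLoopA rest pos
    else if pos % 4 == 3 then
      if !(['-'].contains i) then false else pvLoopA rest pos
    else pvLoopA rest pos

def cadena_alaquasera (cadena : String) : Bool :=
  pvLoopA cadena.toList 0

-- ===== PORT B =====
-- PATTERN = ("qwrtypsdfghjklzxcvbnm", "0123456789", "-", "AEIOUaeiou")
def pvPattern : List (List Char) :=
  ["qwrtypsdfghjklzxcvbnm".toList, "0123456789".toList, "-".toList, "AEIOUaeiou".toList]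

-- B's loop over the blocks cadena[k:k+4]: each iteration checks one 4-char block
-- (take 4) against pvPattern with zip/all, then recurses on the rest (drop 4).
def pvLoopB (cs : List Char) : Bool :=
  if cs = [] then true
  else
    (((cs.take 4).zip pvPattern).all fun p => p.2.contains p.1) && pvLoopB (cs.drop 4)
termination_by cs.length
decreasing_by
  rename_i h
  cases cs with
  | nil => exact absurd rfl h
  | cons a t => simp

def cadena_alaquasera_alt (cadena : String) : Bool :=
  pvLoopB cadena.toList

-- ===== PRECONDITION & SPEC =====
def Spec_cadena_alaquasera (cadena : String) (out : Bool) : Prop := out = cadena_alaquasera_alt cadena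
instance (cadena : String) (out : Bool) : Decidable (Spec_cadena_alaquasera cadena out) := by unfold Spec_cadena_alaquasera; infer_instance

-- ===== CLAIM (what is proved, stated in full; the proofs are below) =====
def Claim_equal_cadena_alaquasera : Prop := ∀ (cadena : String), Dom_cadena_alaquasera cadena → Spec_cadena_alaquasera cadena (cadena_alaquasera cadena)

-- ===== LEMMAS AND PROOFS =====

-- A's loop only depends on pos through pos % 4
lemma pvLoopA_add_four (cs : List Char) : ∀ (p : Int), pvLoopA cs (p + 4) = pvLoopA cs p := by
  induction cs with
  | nil => intro p; simp [pvLoopA]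
  | cons c t ih =>
    intro p
    simp only [pvLoopA]
    have h0 : (p + 4 + 1) % 4 = (p + 1) % 4 := by omega
    have h1 : pvLoopA t (p + 4 + 1) = pvLoopA t (p + 1) := by
      rw [show p + 4 + 1 = (p + 1) + 4 by ring, ih]
    rw [h0, h1]

-- unfolding equations for pvLoopB (the equation lemma generated by Lean loops in simp)
lemma pvLoopB_nil : pvLoopB [] = true := by rw [pvLoopB]; simp

lemma pvLoopB_cons (a : Char) (t : List Char) :
    pvLoopB (a :: t) =
      (((((a :: t).take 4).zip pvPattern).all fun p => p.2.contains p.1) &&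
        pvLoopB ((a :: t).drop 4)) := by
  rw [pvLoopB]; simp

-- one step of A's loop at each residue of pos % 4
lemma pvLoopA_step1 (i : Char) (rest : List Char) (p : Int) (h : (p + 1) % 4 = 1) :
    pvLoopA (i :: rest) p = (pvConsonants.contains i && pvLoopA rest (p + 1)) := by
  simp only [pvLoopA, h]
  norm_num

lemma pvLoopA_step2 (i : Char) (rest : List Char) (p : Int) (h : (p + 1) % 4 = 2) :
    pvLoopA (i :: rest) p = (pvDigits.contains i && pvLoopA rest (p + 1)) := by
  simp only [pvLoopA, h]
  norm_num

lemma pvLoopA_step3 (i : Char) (rest : List Char) (p : Int) (h : (p + 1) % 4 = 3) :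
    pvLoopA (i :: rest) p = (List.contains ['-'] i && pvLoopA rest (p + 1)) := by
  simp only [pvLoopA, h]
  norm_num

lemma pvLoopA_step0 (i : Char) (rest : List Char) (p : Int) (h : (p + 1) % 4 = 0) :
    pvLoopA (i :: rest) p = (pvVowels.contains i && pvLoopA rest (p + 1)) := by
  simp only [pvLoopA, h]
  norm_num

lemma pvLoopA_nil (p : Int) : pvLoopA [] p = true := by simp [pvLoopA]

-- the pattern strings, as the class lists of A
lemma pvPattern_eq : pvPattern = [pvConsonants, pvDigits, ['-'], pvVowels] := by decide

lemma pvLoopA_eq_pvLoopB (n : Nat) : ∀ (cs : List Char), cs.length ≤ n → pvLoopA cs 0 = pvLoopB cs := by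
  induction n with
  | zero =>
    intro cs h
    have : cs = [] := List.eq_nil_of_length_eq_zero (Nat.le_zero.mp h)
    subst this; simp [pvLoopA, pvLoopB_nil]
  | succ n ih =>
    intro cs h
    match cs with
    | [] => simp [pvLoopA, pvLoopB_nil]
    | [a] =>
      rw [pvLoopB_cons, pvLoopA_step1 a [] 0 (by norm_num), pvLoopA_nil, pvPattern_eq]
      simp only [List.take, List.drop, List.zip_cons_cons, List.zip_nil_left, List.all_cons,
        List.all_nil, pvLoopB_nil, Bool.and_true]
    | [a, b] =>
      rw [pvLoopB_cons, pvLoopA_step1 a [b] 0 (by norm_num),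
        pvLoopA_step2 b [] (0+1) (by norm_num), pvLoopA_nil, pvPattern_eq]
      simp only [List.take, List.drop, List.zip_cons_cons, List.zip_nil_left, List.all_cons,
        List.all_nil, pvLoopB_nil, Bool.and_true]
    | [a, b, c] =>
      rw [pvLoopB_cons, pvLoopA_step1 a [b, c] 0 (by norm_num),
        pvLoopA_step2 b [c] (0+1) (by norm_num), pvLoopA_step3 c [] (0+1+1) (by norm_num),
        pvLoopA_nil, pvPattern_eq]
      simp only [List.take, List.drop, List.zip_cons_cons, List.zip_nil_left, List.all_cons,
        List.all_nil, pvLoopB_nil, Bool.and_true]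
    | a :: b :: c :: d :: rest =>
      have hrest : rest.length ≤ n := by simp at h; omega
      have h4 : pvLoopA rest 4 = pvLoopA rest 0 := by
        simpa using pvLoopA_add_four rest 0
      rw [pvLoopB_cons, pvLoopA_step1 a (b :: c :: d :: rest) 0 (by norm_num),
        pvLoopA_step2 b (c :: d :: rest) (0+1) (by norm_num),
        pvLoopA_step3 c (d :: rest) (0+1+1) (by norm_num),
        pvLoopA_step0 d rest (0+1+1+1) (by norm_num), pvPattern_eq]
      norm_num [h4, ih rest hrest]
      simp only [Bool.and_assoc]

-- ===== VERDICT (by name: the statement is the Claim_ definition above) =====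
theorem cadena_alaquasera_spec : Claim_equal_cadena_alaquasera := by
  intro cadena _
  unfold Spec_cadena_alaquasera cadena_alaquasera cadena_alaquasera_alt
  exact pvLoopA_eq_pvLoopB cadena.toList.length cadena.toList le_rfl
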